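-- pv_equiv track=rewrite | github.com/the1howie/Python-Projects | Roman-numerals/roman.py | validate_str
-- ===== SOURCE A (Python) =====
-- VALID_CHARS = ("I", "V", "X", "L", "C", "D", "M", "_")
--
-- def validate_str(txt):
--     valid_txt = txt.strip().upper()
--     if valid_txt == "":
--         return ""
--     for c in valid_txt:
--         if c not in VALID_CHARS:
--             return None
--     if "__" in valid_txt or valid_txt[-1] == "_":
--         return None
--     return valid_txt
-- ===== SOURCE B (Python) =====
-- def validate_str(txt):
--     valid_txt = txt.strip().upper()
--     if valid_txt == "":
--         return ""
--     prev = ""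
--     for c in valid_txt:
--         if c not in "IVXLCDM_" or (c == "_" and prev == "_"):
--             return None
--         prev = c
--     return None if prev == "_" else valid_txt
-- ===== Notes on version B (the rewrite author's own statement) =====
-- stated objective: alternative
-- what changed: B validates the string in one left-to-right automaton pass carrying the previous character (rejecting bad characters, '__' pairs and a trailing '_' as it scans), instead of A's membership loop followed by a separate substring search and a last-character index check.
import Mathlib
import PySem

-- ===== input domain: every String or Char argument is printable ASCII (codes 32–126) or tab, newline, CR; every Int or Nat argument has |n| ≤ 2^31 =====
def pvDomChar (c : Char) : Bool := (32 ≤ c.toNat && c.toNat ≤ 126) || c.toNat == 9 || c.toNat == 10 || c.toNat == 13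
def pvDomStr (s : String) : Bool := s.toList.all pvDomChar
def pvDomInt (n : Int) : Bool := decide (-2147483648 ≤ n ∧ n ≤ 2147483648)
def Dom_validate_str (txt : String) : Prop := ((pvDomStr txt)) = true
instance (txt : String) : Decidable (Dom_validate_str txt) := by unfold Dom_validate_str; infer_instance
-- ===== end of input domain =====

-- B replaces A's membership loop + substring search + last-character check by a single
-- left-to-right pass carrying the previous character; same O(n) cost, different decomposition.

-- ===== PORT A =====
-- VALID_CHARS = ("I", "V", "X", "L", "C", "D", "M", "_")
def aValidChars : List Char := ['I', 'V', 'X', 'L', 'C', 'D', 'M', '_']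

-- 'for c in valid_txt: if c not in VALID_CHARS: return None' — true iff the loop falls through
def aCharsOk : List Char → Bool
  | [] => true
  | c :: rest => if c ∈ aValidChars then aCharsOk rest else false

def validate_str (txt : String) : Option String :=
  let valid_txt := PySem.Str.upper (PySem.Str.strip txt)
  if valid_txt == "" then some ""
  else if aCharsOk valid_txt.toList = false then none
  else if PySem.Str.isIn "__" valid_txt || PySem.Str.pyGet? valid_txt (-1) == some '_' then none
  else some valid_txt

-- ===== PORT B =====
-- the for-loop of Source B: 'prev' starts as "" (here: none); returns none on rejection,
-- otherwise the final value of prev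
def bScan (prev : Option Char) : List Char → Option (Option Char)
  | [] => some prev
  | c :: rest =>
      if !(c ∈ "IVXLCDM_".toList) || (c == '_' && prev == some '_') then none
      else bScan (some c) rest

def validate_str_alt (txt : String) : Option String :=
  let valid_txt := PySem.Str.upper (PySem.Str.strip txt)
  if valid_txt == "" then some ""
  else
    match bScan none valid_txt.toList with
    | none => none
    | some prev => if prev == some '_' then none else some valid_txt

-- ===== PRECONDITION & SPEC =====
def Spec_validate_str (txt : String) (out : Option String) : Prop := out = validate_str_alt txt
instance (txt : String) (out : Option String) : Decidable (Spec_validate_str txt out) := by unfold Spec_validate_str; infer_instance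

-- ===== CLAIM (what is proved, stated in full; the proofs are below) =====
def Claim_equal_validate_str : Prop := ∀ (txt : String), Dom_validate_str txt → Spec_validate_str txt (validate_str txt)

-- ===== LEMMAS AND PROOFS =====

-- 'c ∈ "IVXLCDM_".toList' (B's alphabet test) coincides with A's tuple membership
lemma mem_alpha (c : Char) : (c ∈ "IVXLCDM_".toList) = (c ∈ aValidChars) := by
  rfl

-- adjacent-underscore detector used to characterise bScan
def dd (prev : Option Char) : List Char → Bool
  | [] => false
  | c :: rest => (c == '_' && prev == some '_') || dd (some c) rest

lemma bScan_eq (l : List Char) : ∀ prev, bScan prev l =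
    if aCharsOk l && !(dd prev l) then some (if l = [] then prev else l.getLast?) else none := by
  induction l with
  | nil => intro prev; simp [bScan, aCharsOk, dd]
  | cons c rest ih =>
    intro prev
    simp only [bScan, aCharsOk, dd, mem_alpha]
    by_cases hv : c ∈ aValidChars
    · by_cases hd : (c == '_' && prev == some '_') = true
      · simp [hv, hd]
      · simp only [hv, hd, ih (some c)]
        rcases rest with _ | ⟨d, r⟩ <;> simp [dd, aCharsOk, List.getLast?_cons_cons]
    · simp [hv]

lemma pre2 (l : List Char) : (['_', '_'] <+: l) ↔ (l.head? = some '_' ∧ l.tail.head? = some '_') := by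
  rcases l with _ | ⟨a, _ | ⟨b, t⟩⟩ <;> simp [List.cons_prefix_cons] <;> aesop

lemma dd_iff (l : List Char) : ∀ prev, dd prev l = true ↔
    ((prev = some '_' ∧ l.head? = some '_') ∨ ['_', '_'] <:+: l) := by
  induction l with
  | nil => intro prev; simp [dd]
  | cons c rest ih =>
    intro prev
    simp only [dd, Bool.or_eq_true, Bool.and_eq_true, beq_iff_eq, ih (some c),
      List.infix_cons_iff, pre2, List.head?_cons, List.tail_cons, Option.some.injEq]
    tauto

lemma pyGet_neg_one (l : List Char) (h : l ≠ []) :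
    PySem.List.pyGet? l (-1) = l.getLast? := by
  rcases List.eq_nil_or_concat l with rfl | ⟨t, a, rfl⟩
  · simp at h
  · rw [List.concat_eq_append]
    have := PySem.List.pyGet?_neg_ofNat (t ++ [a]) 1 (by omega) (by simp)
    simp only [show ((-1 : Int)) = -((1 : Nat) : Int) by norm_num] at *
    rw [this]
    simp

lemma main_eq (s : String) (h : ¬ (s == "")) :
    (if aCharsOk s.toList = false then none
     else if PySem.Str.isIn "__" s || PySem.Str.pyGet? s (-1) == some '_' then none
     else some s) =
    (match bScan none s.toList with
     | none => none
     | some prev => if prev == some '_' then (none : Option String) else some s) := by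
  have hne : s.toList ≠ [] := by
    intro hl
    exact h (by cases s; simp_all)
  rw [bScan_eq]
  by_cases hok : aCharsOk s.toList = true
  · by_cases hd : dd none s.toList = true
    · have h2 : PySem.Chars.isIn ['_', '_'] s.toList = true := by
        have := (dd_iff s.toList none).mp hd
        simp only [reduceCtorEq, false_and, false_or] at this
        exact (PySem.Chars.isIn_iff_infix _ _).mpr this
      simp [hok, hd, PySem.Str.isIn, h2]
    · have h2 : PySem.Chars.isIn ['_', '_'] s.toList = false := by
        rw [Bool.eq_false_iff]
        intro hc
        exact hd ((dd_iff s.toList none).mpr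
          (Or.inr ((PySem.Chars.isIn_iff_infix _ _).mp hc)))
      have h3 : PySem.Str.pyGet? s (-1) = s.toList.getLast? := by
        simpa [PySem.Str.pyGet?] using pyGet_neg_one s.toList hne
      simp only [hok, hd, Bool.not_false, Bool.and_true,
        if_neg hne, PySem.Str.isIn, PySem.Chars.isIn, h3]
      have h4 : PySem.Chars.find s.toList ['_', '_'] = -1 :=
        (PySem.Chars.find_eq_neg_one_iff _ _).mpr ((PySem.Chars.isIn_eq_false_iff _ _).mp h2)
      by_cases hl : s.toList.getLast? = some '_' <;> simp [hl, h4]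
  · simp only [Bool.not_eq_true] at hok
    simp [hok]

-- ===== VERDICT (by name: the statement is the Claim_ definition above) =====
theorem validate_str_spec : Claim_equal_validate_str := by
  intro txt _
  unfold Spec_validate_str validate_str validate_str_alt
  set s := PySem.Str.upper (PySem.Str.strip txt) with hs
  by_cases he : s == ""
  · simp [he]
  · simp only [he, Bool.false_eq_true, if_false]
    exact main_eq s (by simp_all)
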